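-- pv_equiv track=rewrite | github.com/anthonymakarewicz/other_projects | qr_code_generation/barbarqr.py | get_valid_images
-- ===== SOURCE A (Python) =====
-- def generate_prime_numbers(lower = 1, upper = 100):
--
--     """ A prime number is a whole number greater than 1
--         whose only factors are 1 and itself.
--         However, 1 is neither a prime number nor a composit number
--
--         Parameters:
--             lower (int): The lower value to generate prime numbers from (defaults: 1)
--             upper (int): The upper value to generate prime numbers from (defaults: 100)
--
--         Returns:
--             list: A list of prime numbers
--     """
--
--
--     prime_numbers = []
--     # add + 1 in the 2nd argument because range(1,N) generates from numbers form 1 to N-1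
--     for number in range(lower, upper + 1):
--         # prime numbers are natural numbers (positive) and larger than one
--         if number > 1:
--             # we take each number from 2 until the number before, as a number is divisble by itself
--             for i in range(2, number):
--                 # if a number is divisible by another number than 1 or itself, it is a composit number
--                 if (number % i) == 0:
--                     # so exit the loop as it is not a prime number and go back to the first loop
--                     break
--             else:
--                 # else it is a prime number
--                 prime_numbers.append(number)
--
--     # return the list of prime numbers
--     return prime_numbers
--
-- def is_not_prime_number(decoded_image, lower = 1, upper = 100):
--
--     """ Function that check weither the sum of digits in a decoded string image
--     is a prime number
--
--
--         Parameters: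
--             string_image (str): An image represented as a string
--             lower (int): The lower to generate prime numbers from (defaults: 1)
--             upper (int): The upper to generate prime numbers from (defaults: 100)
--
--         Returns:
--             bool: True if not a prime number, else False
--     """
--
--
--     # declare and initialize an integer to store results (always initializing a variable)
--     sum_numbers = 0
--     # take a list of prime numbers from lower to upper
--     prime_numbers = generate_prime_numbers(lower, upper)
--
--     for char in decoded_image:
--         # check if each character is numeric
--         if char.isnumeric():
--             # if yes convert it to an integer and add it to the sum
--             sum_numbers += int(char)   # shortcut for sum_numbers = sum_numbers + int(char)
--
--     # stop the function call as soon as one return command is executed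
--     if sum_numbers not in prime_numbers:
--         return True
--     else:
--         return False
--
-- def get_valid_images(decoded_images, lower = 1, upper = 100, list_compr = True):
--
--     """ Obtain all valid images, namely the ones where the sum of its digits
--     is not a prime number
--
--
--         Parameters:
--             decoded_images (list): The decoded images composed of digits and letters
--             lower (int): The lower value to generate prime numbers from (defaults: 1)
--             upper (int): The upper value to generate prime numbers from (defaults: 100)
--             list_compr (bool): Specify whether using a list comprehension (defaults: True)
--
--         Returns:
--             list: The list of all valid images
--     """
--
--
--     # much faster
--     if list_compr == True:
--         valid_images = [dec_im for dec_im in decoded_images if is_not_prime_number(dec_im,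
--                                                                                    lower, upper)]
--         return valid_images
--
--     else:
--         valid_images = []
--         for decoded_image in decoded_images:
--             # if the sum of its digits is not a prime number append the result to the list
--             if is_not_prime_number(decoded_image, lower, upper):
--                 valid_images.append(decoded_image)
--
--         return valid_images
-- ===== SOURCE B (Python) =====
-- def _is_prime(n):
--     """Direct trial division up to sqrt(n) on the single value n."""
--     if n < 2:
--         return False
--     i = 2
--     while i * i <= n:
--         if n % i == 0:
--             return False
--         i += 1
--     return True
--
--
-- def get_valid_images(decoded_images, lower=1, upper=100, list_compr=True):
--     valid_images = []
--     for decoded_image in decoded_images: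
--         s = sum(int(c) for c in decoded_image if c.isdigit())
--         # the digit sum is in A's prime list iff it is prime and lies in [lower, upper]
--         if not (lower <= s <= upper and _is_prime(s)):
--             valid_images.append(decoded_image)
--     return valid_images
-- ===== Notes on version B (the rewrite author's own statement) =====
-- stated objective: alternative
-- what changed: Instead of regenerating the full prime list in [lower,upper] by trial division for every image and testing list membership, B computes each image's digit sum once and tests that single value directly with trial division up to its square root (a sum in [lower,upper] is in A's list iff it is prime).
import Mathlib
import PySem

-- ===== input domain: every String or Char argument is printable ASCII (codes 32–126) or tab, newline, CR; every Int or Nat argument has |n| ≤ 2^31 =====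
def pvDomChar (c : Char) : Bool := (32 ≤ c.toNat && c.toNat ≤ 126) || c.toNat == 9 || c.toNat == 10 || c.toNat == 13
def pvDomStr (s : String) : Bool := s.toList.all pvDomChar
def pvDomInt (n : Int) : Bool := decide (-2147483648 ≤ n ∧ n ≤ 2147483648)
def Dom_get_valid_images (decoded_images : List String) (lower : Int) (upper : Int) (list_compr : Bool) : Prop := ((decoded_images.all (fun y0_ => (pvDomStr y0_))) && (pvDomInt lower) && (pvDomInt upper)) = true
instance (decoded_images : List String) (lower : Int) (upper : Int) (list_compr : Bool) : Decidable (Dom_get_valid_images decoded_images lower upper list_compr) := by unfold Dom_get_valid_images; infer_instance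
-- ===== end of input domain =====

-- B replaces A's per-image regeneration of the whole prime list in [lower, upper] by a single
-- sqrt-bounded trial-division test on the image's digit sum (objective: alternative algorithm).


-- ===== PORT A =====
-- generate_prime_numbers: for number in range(lower, upper+1): inner for-i-with-break/else
-- (the inner 'for i in range(2, number): if number % i == 0: break / else: append' is the any-test)
def generate_prime_numbers (lower : Int) (upper : Int) : List Int :=
  (PySem.List.pyRange lower (upper + 1) 1).foldl
    (fun acc number =>
      if number > 1 then
        if (PySem.List.pyRange 2 number 1).any (fun i => PySem.Int.mod number i == 0) then acc
        else acc ++ [number]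
      else acc) []

-- is_not_prime_number: sum of digit characters, then membership test in the prime list.
-- isnumeric is ported as the per-char isdigit and int(char) as code - 48: exact on printable ASCII (Dom).
def is_not_prime_number (decoded_image : String) (lower : Int) (upper : Int) : Bool :=
  let prime_numbers := generate_prime_numbers lower upper
  let sum_numbers := decoded_image.toList.foldl
    (fun acc c => if PySem.Chars.isdigit c then acc + ((c.toNat : Int) - 48) else acc) 0
  if ¬ (sum_numbers ∈ prime_numbers) then true else false

def get_valid_images (decoded_images : List String) (lower : Int) (upper : Int) (list_compr : Bool) : List String :=
  if list_compr == true then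
    decoded_images.filter (fun dec_im => is_not_prime_number dec_im lower upper)
  else
    decoded_images.foldl
      (fun acc decoded_image =>
        if is_not_prime_number decoded_image lower upper then acc ++ [decoded_image] else acc) []

-- ===== PORT B =====
-- while i * i <= n: … i += 1   (i kept as a Nat; starts at 2 and only grows)
def bTrial (n : Int) (i : Nat) : Bool :=
  if _h : (i : Int) * (i : Int) ≤ n then
    if PySem.Int.mod n (i : Int) == 0 then false else bTrial n (i + 1)
  else true
termination_by n.toNat + 1 - i
decreasing_by
  have hii : i ≤ i * i := by nlinarith
  have h0 : (i * i : Nat) ≤ n.toNat := by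
    have : ((i * i : Nat) : Int) ≤ n := by push_cast; exact _h
    omega
  omega

def b_is_prime (n : Int) : Bool :=
  if n < 2 then false else bTrial n 2

def bDigitSum (decoded_image : String) : Int :=
  ((decoded_image.toList.filter (fun c => PySem.Chars.isdigit c)).map
    (fun c => ((c.toNat : Int) - 48))).sum

def get_valid_images_alt (decoded_images : List String) (lower : Int) (upper : Int) (list_compr : Bool) : List String :=
  decoded_images.foldl
    (fun acc decoded_image =>
      let s := bDigitSum decoded_image
      if ¬ (lower ≤ s ∧ s ≤ upper ∧ b_is_prime s = true) then acc ++ [decoded_image] else acc) []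

-- ===== PRECONDITION & SPEC =====
def Spec_get_valid_images (decoded_images : List String) (lower : Int) (upper : Int) (list_compr : Bool) (out : List String) : Prop := out = get_valid_images_alt decoded_images lower upper list_compr
instance (decoded_images : List String) (lower : Int) (upper : Int) (list_compr : Bool) (out : List String) : Decidable (Spec_get_valid_images decoded_images lower upper list_compr out) := by unfold Spec_get_valid_images; infer_instance

-- ===== CLAIM (what is proved, stated in full; the proofs are below) =====
def Claim_equal_get_valid_images : Prop := ∀ (decoded_images : List String) (lower : Int) (upper : Int) (list_compr : Bool), Dom_get_valid_images decoded_images lower upper list_compr → Spec_get_valid_images decoded_images lower upper list_compr (get_valid_images decoded_images lower upper list_compr)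

-- ===== LEMMAS AND PROOFS =====

-- A's digit-sum accumulation equals B's sum-of-mapped-filter.
theorem digitSum_eq (l : List Char) (acc : Int) :
    l.foldl (fun acc c => if PySem.Chars.isdigit c then acc + ((c.toNat : Int) - 48) else acc) acc
      = acc + ((l.filter (fun c => PySem.Chars.isdigit c)).map (fun c => ((c.toNat : Int) - 48))).sum := by
  induction l generalizing acc with
  | nil => simp
  | cons c t ih =>
    by_cases h : PySem.Chars.isdigit c = true <;> simp [h, ih] <;> ring

-- the digit sum is nonnegative
theorem bDigitSum_nonneg (s : String) : 0 ≤ bDigitSum s := by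
  unfold bDigitSum
  apply List.sum_nonneg
  intro x hx
  simp only [List.mem_map, List.mem_filter] at hx
  obtain ⟨c, ⟨_, hd⟩, rfl⟩ := hx
  have h48 : 48 ≤ c.toNat := by
    simp only [PySem.Chars.isdigit, Bool.and_eq_true, decide_eq_true_eq] at hd
    obtain ⟨h1, _⟩ := hd
    rw [Char.le_def, UInt32.le_iff_toNat_le] at h1
    exact h1
  omega

-- membership in A's generated prime list
theorem mem_generate (lower upper n : Int) :
    n ∈ generate_prime_numbers lower upper ↔
      lower ≤ n ∧ n ≤ upper ∧ 1 < n ∧ ∀ i : Int, 2 ≤ i → i < n → ¬ i ∣ n := by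
  unfold generate_prime_numbers
  rw [show (fun (acc : List Int) number =>
      if number > 1 then
        if (PySem.List.pyRange 2 number 1).any (fun i => PySem.Int.mod number i == 0) then acc
        else acc ++ [number]
      else acc)
    = (fun acc number =>
        if (decide (number > 1) &&
            !((PySem.List.pyRange 2 number 1).any (fun i => PySem.Int.mod number i == 0))) = true
        then acc ++ [number] else acc) from by
      funext acc number
      by_cases h1 : number > 1 <;>
        by_cases h2 : (PySem.List.pyRange 2 number 1).any (fun i => PySem.Int.mod number i == 0) = true <;>
        simp [h1, h2]]
  rw [PySem.List.foldl_append_if_eq_filter]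
  simp [List.mem_filter, PySem.List.mem_pyRange_one, List.any_eq, PySem.List.mem_pyRange_one,
    PySem.Int.mod_eq_zero_iff_dvd]
  constructor
  · rintro ⟨⟨h1, h2⟩, h3, h4⟩
    exact ⟨h1, by omega, h3, fun i hi hin hdvd => h4 i hi hin hdvd⟩
  · rintro ⟨h1, h2, h3, h4⟩
    exact ⟨⟨h1, by omega⟩, h3, fun i hi hin hdvd => h4 i hi hin hdvd⟩

-- A's no-divisor-below-n condition is primality (for nonnegative n)
theorem aCond_iff_prime (n : Int) (hn : 0 ≤ n) :
    (1 < n ∧ ∀ i : Int, 2 ≤ i → i < n → ¬ i ∣ n) ↔ Nat.Prime n.toNat := by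
  rw [Nat.prime_def_lt']
  constructor
  · rintro ⟨h1, h2⟩
    refine ⟨by omega, fun m hm hmn hdvd => ?_⟩
    refine h2 (m : Int) (by exact_mod_cast hm) (by omega) ?_
    have : ((m : Int)) ∣ ((n.toNat : Nat) : Int) := Int.natCast_dvd_natCast.mpr hdvd
    simpa [Int.toNat_of_nonneg hn] using this
  · rintro ⟨h1, h2⟩
    refine ⟨by omega, fun i hi hin hdvd => ?_⟩
    refine h2 i.toNat (by omega) (by omega) ?_
    have : (i.toNat : Int) ∣ (n.toNat : Int) := by
      rw [Int.toNat_of_nonneg (by omega : (0:Int) ≤ i), Int.toNat_of_nonneg hn]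
      exact hdvd
    exact_mod_cast this

-- characterisation of B's trial loop
theorem bTrial_iff (n : Int) (i : Nat) :
    bTrial n i = true ↔ ∀ j : Nat, i ≤ j → (j : Int) * (j : Int) ≤ n → ¬ (j : Int) ∣ n := by
  fun_induction bTrial n i with
  | case1 i h hmod =>
    constructor
    · intro hfalse
      exact absurd hfalse (by simp)
    · intro hall
      exact absurd ((PySem.Int.mod_eq_zero_iff_dvd n i).mp (by simpa using hmod)) (hall i le_rfl h)
  | case2 i h hmod ih =>
    rw [ih]
    constructor
    · intro hall j hij hjj
      rcases Nat.eq_or_lt_of_le hij with heq | hlt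
      · subst heq
        intro hdvd
        exact absurd ((PySem.Int.mod_eq_zero_iff_dvd n (i : Int)).mpr hdvd) (by simpa using hmod)
      · exact hall j hlt hjj
    · intro hall j hij hjj
      exact hall j (by omega) hjj
  | case3 i h =>
    constructor
    · intro _ j hij hjj hdvd
      have hi2 : ((i : Int)) * (i : Int) ≤ (j : Int) * (j : Int) := by
        have hij' : (i : Int) ≤ (j : Int) := by exact_mod_cast hij
        nlinarith [Int.natCast_nonneg i]
      exact h (le_trans hi2 hjj)
    · intro _
      rfl

-- B's test is primality (for nonnegative n)
theorem b_is_prime_iff (n : Int) (hn : 0 ≤ n) :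
    b_is_prime n = true ↔ Nat.Prime n.toNat := by
  unfold b_is_prime
  by_cases h2 : n < 2
  · simp [h2]
    intro hp
    have := hp.two_le
    omega
  · simp [h2]
    rw [bTrial_iff, Nat.prime_def_le_sqrt]
    constructor
    · intro hall
      refine ⟨by omega, fun m hm hms hdvd => ?_⟩
      have hmm : (m : Int) * (m : Int) ≤ n := by
        have := (Nat.le_sqrt.mp hms)
        have : ((m * m : Nat) : Int) ≤ ((n.toNat : Nat) : Int) := by exact_mod_cast this
        push_cast at this
        omega
      refine hall m hm hmm ?_
      have : ((m : Int)) ∣ ((n.toNat : Nat) : Int) := Int.natCast_dvd_natCast.mpr hdvd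
      simpa [Int.toNat_of_nonneg hn] using this
    · rintro ⟨_, hall⟩ j hj hjj hdvd
      refine hall j hj (Nat.le_sqrt.mpr ?_) ?_
      · have : ((j * j : Nat) : Int) ≤ n := by push_cast; exact hjj
        omega
      · have : (j : Int) ∣ (n.toNat : Int) := by
          rw [Int.toNat_of_nonneg hn]; exact hdvd
        exact_mod_cast this

-- pointwise: A's keep-test equals B's keep-test
theorem keep_iff (d : String) (lower upper : Int) :
    is_not_prime_number d lower upper
      = decide (¬ (lower ≤ bDigitSum d ∧ bDigitSum d ≤ upper ∧ b_is_prime (bDigitSum d) = true)) := by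
  unfold is_not_prime_number
  have hsum : d.toList.foldl
      (fun acc c => if PySem.Chars.isdigit c then acc + ((c.toNat : Int) - 48) else acc) 0
      = bDigitSum d := by
    rw [digitSum_eq]; simp [bDigitSum]
  rw [hsum]
  have hnn := bDigitSum_nonneg d
  have hmem : bDigitSum d ∈ generate_prime_numbers lower upper ↔
      (lower ≤ bDigitSum d ∧ bDigitSum d ≤ upper ∧ b_is_prime (bDigitSum d) = true) := by
    rw [mem_generate]
    constructor
    · rintro ⟨h1, h2, h3⟩
      exact ⟨h1, h2, (b_is_prime_iff _ hnn).mpr ((aCond_iff_prime _ hnn).mp h3)⟩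
    · rintro ⟨h1, h2, h3⟩
      exact ⟨h1, h2, (aCond_iff_prime _ hnn).mpr ((b_is_prime_iff _ hnn).mp h3)⟩
  by_cases hm : bDigitSum d ∈ generate_prime_numbers lower upper
  · simp [hm, hmem.mp hm]
  · have hn2 : ¬ (lower ≤ bDigitSum d ∧ bDigitSum d ≤ upper ∧ b_is_prime (bDigitSum d) = true) :=
      fun hc => hm (hmem.mpr hc)
    simp [hm, hn2]

-- ===== VERDICT (by name: the statement is the Claim_ definition above) =====
theorem get_valid_images_spec : Claim_equal_get_valid_images := by
  intro decoded_images lower upper list_compr _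
  unfold Spec_get_valid_images get_valid_images get_valid_images_alt
  have halt : decoded_images.foldl
      (fun acc decoded_image =>
        let s := bDigitSum decoded_image
        if ¬ (lower ≤ s ∧ s ≤ upper ∧ b_is_prime s = true) then acc ++ [decoded_image] else acc) []
      = decoded_images.filter (fun d => is_not_prime_number d lower upper) := by
    rw [show (fun (acc : List String) decoded_image =>
        let s := bDigitSum decoded_image
        if ¬ (lower ≤ s ∧ s ≤ upper ∧ b_is_prime s = true) then acc ++ [decoded_image] else acc)
      = (fun acc d =>
          if (is_not_prime_number d lower upper) = true then acc ++ [d] else acc) from by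
        funext acc d
        rw [keep_iff]
        by_cases h : (lower ≤ bDigitSum d ∧ bDigitSum d ≤ upper ∧ b_is_prime (bDigitSum d) = true) <;>
          simp [h]]
    rw [PySem.List.foldl_append_if_eq_filter]
    simp
  by_cases hl : list_compr = true
  · rw [if_pos (by simp [hl]), halt]
  · rw [if_neg (by simp [hl]), halt]
    rw [PySem.List.foldl_append_if_eq_filter]
    simp
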